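-- pv_equiv track=rewrite | github.com/pastrop/pyProjects | cdstr.py | count_str
-- ===== SOURCE A (Python) =====
-- def count_str(str):
-- 	counts=[]
-- 	tmp=str[0]
-- 	length=len(str)
-- 	for i in range(1,length):
-- 		if str[i] in tmp:
-- 			tmp += str[i]
-- 			continue
-- 		counts.append(len(tmp))
-- 		tmp=str[i]
-- 	counts.append(len(tmp))
-- 	return counts
-- ===== SOURCE B (Python) =====
-- def count_str(str):
--     counts = []
--     n = len(str)
--     i = 0
--     while i < n:
--         j = i + 1
--         while j < n and str[j] == str[i]:
--             j += 1
--         counts.append(j - i)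
--         i = j
--     return counts
-- ===== Notes on version B (the rewrite author's own statement) =====
-- stated objective: alternative
-- what changed: B uses a two-pointer scan (inner while advances to the end of each run, emitting j-i) instead of A's single loop accumulating a growing tmp string and emitting len(tmp) at change points; B also avoids A's O(run^2) string concatenation.
-- outside the precondition, e.g. on count_str(''): A raises IndexError, B returns []
-- crash fix: On the empty string A raises IndexError (str[0]); B returns []. — e.g. on count_str(""): A raises IndexError, B returns []
import Mathlib
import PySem

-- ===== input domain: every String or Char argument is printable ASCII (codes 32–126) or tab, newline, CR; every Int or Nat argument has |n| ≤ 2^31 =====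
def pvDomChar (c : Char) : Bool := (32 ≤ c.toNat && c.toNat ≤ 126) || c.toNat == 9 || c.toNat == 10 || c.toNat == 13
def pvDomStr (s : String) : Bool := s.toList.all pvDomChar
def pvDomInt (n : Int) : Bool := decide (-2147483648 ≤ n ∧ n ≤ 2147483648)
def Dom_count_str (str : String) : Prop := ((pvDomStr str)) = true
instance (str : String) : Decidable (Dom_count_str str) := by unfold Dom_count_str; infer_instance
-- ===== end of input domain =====

-- B replaces A's tmp-string accumulation with a two-pointer run scan (alternative decomposition);
-- on the empty string A raises IndexError while B returns [] (Pre_/Raises_ below).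


-- ===== PORT A =====
-- A's loop 'for i in range(1,length)' reads exactly str[1], …, str[length-1] in order,
-- which are the elements of the tail of the char list; the fold keeps A's (tmp, counts) state,
-- 'str[i] in tmp' is substring membership, exact here as List.contains since the needle is one char.
def count_str (str : String) : List Int :=
  match str.toList with
  | [] => []   -- A raises IndexError at str[0]; excluded by Pre_count_str
  | c0 :: rest =>
    let st := rest.foldl (fun (acc : List Char × List Int) c =>
        if acc.1.contains c then (acc.1 ++ [c], acc.2)
        else ([c], acc.2 ++ [Int.ofNat acc.1.length])) ([c0], [])
    st.2 ++ [Int.ofNat st.1.length]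

-- ===== PORT B =====
-- countRun = B's inner while: length of the run of chars equal to c, and the remainder (index j).
def countRun (c : Char) : List Char → Nat × List Char
  | [] => (0, [])
  | d :: t => if d == c then ((countRun c t).1 + 1, (countRun c t).2) else (0, d :: t)

theorem countRun_snd_le (c : Char) : ∀ (l : List Char), (countRun c l).2.length ≤ l.length := by
  intro l; induction l with
  | nil => simp [countRun]
  | cons d t ih =>
      by_cases h : d == c
      · simp [countRun, h]; omega
      · simp [countRun, h]

-- B's outer while loop: at each position emit (j - i) = run length and continue at j.
def count_str_alt_go (l : List Char) : List Int :=
  match h : l with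
  | [] => []
  | c :: t =>
    (Int.ofNat ((countRun c t).1 + 1)) :: count_str_alt_go (countRun c t).2
termination_by l.length
decreasing_by simp; have := countRun_snd_le c t; omega

def count_str_alt (str : String) : List Int := count_str_alt_go str.toList

-- ===== PRECONDITION & SPEC =====
-- Pre_ excludes only the empty string, on which A raises IndexError.
def Pre_count_str (str : String) : Prop := str.toList ≠ []   -- str nonempty
instance (str : String) : Decidable (Pre_count_str str) := by unfold Pre_count_str; infer_instance
def pvWitness_count_str : String := "aab"

-- On the empty string A raises IndexError (str[0]); B returns [].
def Raises_count_str (str : String) : Prop := str.toList = []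
instance (str : String) : Decidable (Raises_count_str str) := by unfold Raises_count_str; infer_instance
def pvRaiseWitness_count_str : String := ""
def pvRaiseWitnessOut_count_str : List Int := []

def Spec_count_str (str : String) (out : List Int) : Prop := out = count_str_alt str
instance (str : String) (out : List Int) : Decidable (Spec_count_str str out) := by unfold Spec_count_str; infer_instance

-- ===== CLAIM (what is proved, stated in full; the proofs are below) =====
def Claim_equal_count_str : Prop := ∀ (str : String), Dom_count_str str → Pre_count_str str → Spec_count_str str (count_str str)
def Claim_raises_count_str : Prop := (∀ (str : String), Dom_count_str str → Raises_count_str str → ¬ Pre_count_str str) ∧ (Dom_count_str (pvRaiseWitness_count_str) ∧ Raises_count_str (pvRaiseWitness_count_str) ∧ count_str_alt (pvRaiseWitness_count_str) = pvRaiseWitnessOut_count_str)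

-- ===== LEMMAS AND PROOFS =====

theorem contains_replicate (k : Nat) (c d : Char) :
    (List.replicate (k + 1) c).contains d = (d == c) := by
  by_cases h : d = c
  · subst h; simp [List.mem_replicate]
  · simp [List.mem_replicate, h]

-- Invariant: A's tmp is always a replicate of one char; with tmp = replicate (k+1) c,
-- the remaining fold produces B's output with the first run extended by k+1.
theorem fold_invariant (l : List Char) : ∀ (c : Char) (k : Nat) (counts : List Int),
    (let st := l.foldl (fun (acc : List Char × List Int) ch =>
        if acc.1.contains ch then (acc.1 ++ [ch], acc.2)
        else ([ch], acc.2 ++ [Int.ofNat acc.1.length])) (List.replicate (k + 1) c, counts)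
     st.2 ++ [Int.ofNat st.1.length])
    = counts ++ ((Int.ofNat ((countRun c l).1 + k + 1)) :: count_str_alt_go (countRun c l).2) := by
  induction l with
  | nil => intro c k counts; simp [countRun, count_str_alt_go]
  | cons d t ih =>
    intro c k counts
    by_cases h : d = c
    · subst h
      simp only [List.foldl_cons, contains_replicate, BEq.rfl, if_pos]
      rw [show List.replicate (k + 1) d ++ [d] = List.replicate (k + 1 + 1) d by
        simp [List.replicate_succ']]
      rw [ih d (k + 1) counts]
      simp [countRun]
      omega
    · simp only [List.foldl_cons, contains_replicate]
      rw [if_neg (by simp [h])]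
      have := ih d 0 (counts ++ [Int.ofNat (List.replicate (k + 1) c).length])
      rw [show (List.replicate 1 d) = [d] by rfl] at this
      rw [this]
      simp [countRun, h, count_str_alt_go]

-- ===== VERDICT (by name: the statement is the Claim_ definition above) =====
theorem count_str_spec : Claim_equal_count_str := by
  intro str _ hpre
  unfold Spec_count_str count_str count_str_alt
  cases hs : str.toList with
  | nil => exact absurd hs hpre
  | cons c0 rest =>
    have := fold_invariant rest c0 0 []
    rw [show (List.replicate 1 c0) = [c0] by rfl] at this
    simp only [] at this ⊢
    rw [this]
    simp [count_str_alt_go]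

@[simp] theorem count_str_raises : Claim_raises_count_str := by
  unfold Claim_raises_count_str
  refine ⟨fun s _ h => by simp [Pre_count_str, Raises_count_str] at h ⊢; exact h, by decide, by decide, ?_⟩
  simp [count_str_alt, pvRaiseWitness_count_str, pvRaiseWitnessOut_count_str, count_str_alt_go]
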